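-- pv_equiv track=rewrite | github.com/dhruvbhargav08/DSA | Carpet_into_Box.py | carpetBox
-- ===== SOURCE A (Python) =====
-- def carpetBox(a,b,c,d):
--     #code here
--     flag1=0
--     flag2=0
--     temp1,temp2=a,b
--     while a>c:
--         a=a//2
--         flag1+=1
--     while b>d:
--         b=b//2
--         flag1+=1
--     a,b=temp2,temp1
--     while a>c:
--         a=a//2
--         flag2+=1
--     while b>d:
--         b=b//2
--         flag2+=1
--     return min(flag1,flag2)
-- ===== SOURCE B (Python) =====
-- def carpetBox(a, b, c, d):
--     def h(x, lim):
--         if x <= lim: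
--             return 0
--         return ((x + lim + 1) // (lim + 1) - 1).bit_length()
--     return min(h(a, c) + h(b, d), h(b, c) + h(a, d))
-- ===== Notes on version B (the rewrite author's own statement) =====
-- stated objective: simpler
-- what changed: Replaces the four halving while-loops with a closed-form helper h(x,lim) computing the halving count from a ceiling division and bit_length, applied to both orientations.
-- outside the precondition, e.g. on carpetBox(1, 1, -1, -1): A does not finish within the time limit, B raises ZeroDivisionError; on carpetBox(5, 5, -3, -3): A does not finish within the time limit, B returns 4
import Mathlib
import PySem

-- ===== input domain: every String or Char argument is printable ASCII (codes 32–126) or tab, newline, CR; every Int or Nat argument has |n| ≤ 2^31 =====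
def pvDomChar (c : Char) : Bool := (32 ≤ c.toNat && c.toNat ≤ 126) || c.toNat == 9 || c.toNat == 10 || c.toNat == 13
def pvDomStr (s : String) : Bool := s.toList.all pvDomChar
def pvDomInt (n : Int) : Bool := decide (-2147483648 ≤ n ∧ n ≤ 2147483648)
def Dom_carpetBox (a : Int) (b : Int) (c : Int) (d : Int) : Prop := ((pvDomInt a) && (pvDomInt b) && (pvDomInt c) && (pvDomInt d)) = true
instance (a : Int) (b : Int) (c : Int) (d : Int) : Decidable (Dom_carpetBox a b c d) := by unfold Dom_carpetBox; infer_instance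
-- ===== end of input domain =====

-- B replaces A's four halving while-loops by a closed-form halving count (ceiling division + bit_length), one helper per (side, limit) pair; objective: simpler.

-- ===== PORT A =====
-- fuel-guarded transcription of A's 'while x > lim: x //= 2; flag += 1' loop
-- (the fuel only makes the loop total; 100 iterations suffice on Dom inputs where A terminates)
def pvLoopA : Nat → Int → Int → Int → Int
  | 0, _, _, flag => flag
  | f + 1, x, lim, flag =>
      if lim < x then pvLoopA f (PySem.Int.floordiv x 2) lim (flag + 1) else flag

def carpetBox (a : Int) (b : Int) (c : Int) (d : Int) : Int :=
  -- temp1,temp2 = a,b ; flag1 from (a vs c) then (b vs d); swap; flag2 from (b vs c) then (a vs d)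
  let flag1 := pvLoopA 100 b d (pvLoopA 100 a c 0)
  let flag2 := pvLoopA 100 a d (pvLoopA 100 b c 0)
  min flag1 flag2

-- ===== PORT B =====
-- h(x, lim) = 0 if x <= lim else ((x + lim + 1) // (lim + 1) - 1).bit_length()
def pvH (x lim : Int) : Int :=
  if x ≤ lim then 0
  else (PySem.Int.bitLength (PySem.Int.floordiv (x + lim + 1) (lim + 1) - 1) : Int)

def carpetBox_alt (a : Int) (b : Int) (c : Int) (d : Int) : Int :=
  min (pvH a c + pvH b d) (pvH b c + pvH a d)

-- ===== PRECONDITION & SPEC =====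
-- Pre_ is exactly where Python A terminates: each 'while x > lim: x //= 2' loop returns
-- iff x ≤ lim already or lim ≥ 0 (for lim < 0 a nonnegative x gets stuck at 0, a negative x at -1);
-- on the excluded inputs A diverges (and B raises ZeroDivisionError or returns, outside any claim).
def Pre_carpetBox (a : Int) (b : Int) (c : Int) (d : Int) : Prop :=
  (a ≤ c ∨ 0 ≤ c) ∧ (b ≤ d ∨ 0 ≤ d) ∧ (b ≤ c ∨ 0 ≤ c) ∧ (a ≤ d ∨ 0 ≤ d)
instance (a : Int) (b : Int) (c : Int) (d : Int) : Decidable (Pre_carpetBox a b c d) := by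
  unfold Pre_carpetBox; infer_instance

def pvWitness_carpetBox : Int × Int × Int × Int := (20, 30, 3, 4)

def Spec_carpetBox (a : Int) (b : Int) (c : Int) (d : Int) (out : Int) : Prop := out = carpetBox_alt a b c d
instance (a : Int) (b : Int) (c : Int) (d : Int) (out : Int) : Decidable (Spec_carpetBox a b c d out) := by unfold Spec_carpetBox; infer_instance

-- ===== CLAIM (what is proved, stated in full; the proofs are below) =====
def Claim_equal_carpetBox : Prop := ∀ (a : Int) (b : Int) (c : Int) (d : Int), Dom_carpetBox a b c d → Pre_carpetBox a b c d → Spec_carpetBox a b c d (carpetBox a b c d)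

-- ===== LEMMAS AND PROOFS =====

-- halving count, on Nat, for the proofs only
def pvCountN (n l : Nat) : Nat :=
  if n ≤ l then 0 else pvCountN (n / 2) l + 1
termination_by n
decreasing_by exact Nat.div_lt_self (by omega) (by omega)

theorem pvCountN_le_iff (l : Nat) : ∀ (k n : Nat), pvCountN n l ≤ k ↔ n < (l + 1) * 2 ^ k := by
  intro k
  induction k with
  | zero =>
    intro n
    rw [pvCountN]
    split <;> simp <;> omega
  | succ k ih =>
    intro n
    rw [pvCountN]
    split
    · have h2 : 1 ≤ 2 ^ (k + 1) := Nat.one_le_two_pow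
      have : l + 1 ≤ (l + 1) * 2 ^ (k + 1) := Nat.le_mul_of_pos_right _ (by omega)
      simp only [Nat.zero_le, true_iff]
      omega
    · rw [Nat.add_le_add_iff_right, ih (n / 2), Nat.div_lt_iff_lt_mul (by omega : 0 < 2)]
      rw [pow_succ, ← Nat.mul_assoc]

theorem pvLoopA_stop (f : Nat) (x lim flag : Int) (h : ¬ lim < x) :
    pvLoopA f x lim flag = flag := by
  cases f <;> simp [pvLoopA, h]

theorem pvLoopA_eq_count : ∀ (f : Nat) (x lim flag : Int), 0 ≤ lim →
    pvCountN x.toNat lim.toNat ≤ f →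
    pvLoopA f x lim flag = flag + (pvCountN x.toNat lim.toNat : Int) := by
  intro f
  induction f with
  | zero =>
    intro x lim flag _ hf
    have h0 : pvCountN x.toNat lim.toNat = 0 := Nat.le_zero.1 hf
    simp [pvLoopA, h0]
  | succ f ih =>
    intro x lim flag hlim hf
    by_cases hlt : lim < x
    · have hx1 : 1 ≤ x := by omega
      have hxt : lim.toNat < x.toNat := by omega
      have hrec : pvCountN x.toNat lim.toNat = pvCountN (x.toNat / 2) lim.toNat + 1 := by
        rw [pvCountN]; simp [Nat.not_le.2 hxt]
      have hdiv : PySem.Int.floordiv x 2 = ((x.toNat / 2 : Nat) : Int) := by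
        have := PySem.Int.floordiv_natCast x.toNat 2
        rwa [Int.toNat_of_nonneg (by omega : (0:Int) ≤ x)] at this
      have htn : (PySem.Int.floordiv x 2).toNat = x.toNat / 2 := by
        rw [hdiv]; exact Int.toNat_natCast _
      show pvLoopA (f + 1) x lim flag = _
      rw [pvLoopA, if_pos hlt, ih (PySem.Int.floordiv x 2) lim (flag + 1) hlim (by rw [htn]; omega),
        htn, hrec]
      push_cast; ring
    · rw [pvLoopA_stop _ _ _ _ hlt]
      have h0 : pvCountN x.toNat lim.toNat = 0 := by
        have hxy : x.toNat ≤ lim.toNat := by omega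
        rw [pvCountN]; simp [hxy]
      rw [h0]; simp

theorem pvBitLength_le_iff (q : Int) (hq : 1 ≤ q) (k : Nat) :
    PySem.Int.bitLength q ≤ k ↔ q < 2 ^ k := by
  constructor
  · intro h
    have h1 := PySem.Int.lt_two_pow_bitLength q
    have h2 : (2:Nat) ^ PySem.Int.bitLength q ≤ 2 ^ k := Nat.pow_le_pow_right (by omega) h
    have h3 : q.natAbs < 2 ^ k := lt_of_lt_of_le h1 h2
    have : (q.natAbs : Int) < ((2 ^ k : Nat) : Int) := by exact_mod_cast h3
    rw [Int.natAbs_of_nonneg (by omega)] at this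
    simpa using this
  · intro h
    by_contra hk
    have hk' : k ≤ PySem.Int.bitLength q - 1 := by omega
    have h1 := PySem.Int.two_pow_bitLength_le q (by omega)
    have h2 : (2:Nat) ^ k ≤ q.natAbs :=
      le_trans (Nat.pow_le_pow_right (by omega) hk') h1
    have : ((2 ^ k : Nat) : Int) ≤ (q.natAbs : Int) := by exact_mod_cast h2
    rw [Int.natAbs_of_nonneg (by omega)] at this
    push_cast at this
    omega

-- the bridge: for x > lim ≥ 0 the closed form counts exactly the halvings
theorem pvCount_eq_bitLength (x lim : Int) (hlim : 0 ≤ lim) (hlt : lim < x) :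
    pvCountN x.toNat lim.toNat =
      PySem.Int.bitLength (PySem.Int.floordiv (x + lim + 1) (lim + 1) - 1) := by
  set q : Int := PySem.Int.floordiv (x + lim + 1) (lim + 1) - 1 with hqdef
  have hlimpos : (0:Int) < lim + 1 := by omega
  have hq1 : 1 ≤ q := by
    have : (2:Int) ≤ PySem.Int.floordiv (x + lim + 1) (lim + 1) := by
      rw [PySem.Int.le_floordiv_iff_mul_le hlimpos]; omega
    omega
  -- q < 2^k ↔ x.toNat < (lim.toNat+1)*2^k, for every k
  have hchar : ∀ k : Nat, q < 2 ^ k ↔ x.toNat < (lim.toNat + 1) * 2 ^ k := by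
    intro k
    have hd : PySem.Int.floordiv (x + lim + 1) (lim + 1) < 2 ^ k + 1 ↔
        x + lim + 1 < (2 ^ k + 1) * (lim + 1) :=
      PySem.Int.floordiv_lt_iff_lt_mul hlimpos
    have hcast : (((lim.toNat + 1) * 2 ^ k : Nat) : Int) = (lim + 1) * 2 ^ k := by
      push_cast [Int.toNat_of_nonneg hlim]; ring
    constructor
    · intro h
      have hx : x + lim + 1 < (2 ^ k + 1) * (lim + 1) := hd.1 (by omega)
      have hxlt : x < (lim + 1) * 2 ^ k := by nlinarith
      have hxi : (x.toNat : Int) < (((lim.toNat + 1) * 2 ^ k : Nat) : Int) := by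
        rw [hcast, Int.toNat_of_nonneg (by omega : (0:Int) ≤ x)]; exact hxlt
      exact_mod_cast hxi
    · intro h
      have hx' : (x.toNat : Int) < (((lim.toNat + 1) * 2 ^ k : Nat) : Int) := by exact_mod_cast h
      rw [hcast, Int.toNat_of_nonneg (by omega : (0:Int) ≤ x)] at hx'
      have hxx : x < (lim + 1) * 2 ^ k := hx'
      have : x + lim + 1 < (2 ^ k + 1) * (lim + 1) := by nlinarith
      omega
  apply Nat.le_antisymm
  · rw [pvCountN_le_iff]
    have hqlt : q < 2 ^ PySem.Int.bitLength q := by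
      have h1 := PySem.Int.lt_two_pow_bitLength q
      have h2 : (q.natAbs : Int) < ((2 ^ PySem.Int.bitLength q : Nat) : Int) := by exact_mod_cast h1
      rw [Int.natAbs_of_nonneg (by omega)] at h2
      push_cast at h2
      exact h2
    exact (hchar _).1 hqlt
  · rw [pvBitLength_le_iff q hq1]
    exact (hchar _).2 ((pvCountN_le_iff _ _ _).1 (le_refl _))

-- one loop = one closed-form helper, on terminating, Dom-bounded inputs
theorem pvLoop_eq_H (x lim flag : Int) (hx : x ≤ 2147483648) (hpre : x ≤ lim ∨ 0 ≤ lim) :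
    pvLoopA 100 x lim flag = flag + pvH x lim := by
  by_cases hle : x ≤ lim
  · rw [pvLoopA_stop _ _ _ _ (by omega), pvH, if_pos hle]; ring
  · have hlim : 0 ≤ lim := by tauto
    have hlt : lim < x := by omega
    have hfuel : pvCountN x.toNat lim.toNat ≤ 100 := by
      rw [pvCountN_le_iff]
      have h1 : x.toNat < 2 ^ 100 := by
        have : (2147483648 : Int) < ((2:Int) ^ 100) := by norm_num
        omega
      have : (2:Nat) ^ 100 ≤ (lim.toNat + 1) * 2 ^ 100 := Nat.le_mul_of_pos_left _ (by omega)
      omega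
    rw [pvLoopA_eq_count 100 x lim flag hlim hfuel, pvH, if_neg hle,
      pvCount_eq_bitLength x lim hlim hlt]

-- ===== VERDICT (by name: the statement is the Claim_ definition above) =====
theorem carpetBox_spec : Claim_equal_carpetBox := by
  intro a b c d hdom hpre
  unfold Dom_carpetBox pvDomInt at hdom
  simp only [Bool.and_eq_true, decide_eq_true_eq] at hdom
  obtain ⟨⟨⟨ha, hb⟩, hc⟩, hd⟩ := hdom
  obtain ⟨h1, h2, h3, h4⟩ := hpre
  unfold Spec_carpetBox carpetBox carpetBox_alt
  rw [pvLoop_eq_H a c 0 (by omega) h1, pvLoop_eq_H b d _ (by omega) h2,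
    pvLoop_eq_H b c 0 (by omega) h3, pvLoop_eq_H a d _ (by omega) h4]
  simp [add_comm]
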